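-- pv_equiv track=rewrite | github.com/CptCookie/AOC | Python/Year2017/Day21/solution.py | disassemble_display
-- ===== SOURCE A (Python) =====
-- def disassemble_display(display: list[str]):
--     if len(display) % 2 == 0:
--         mode = 2
--     elif len(display) % 3 == 0:
--         mode = 3
--     else:
--         raise ValueError(f"Can not disassemble {len(display)}")
--
--     all_patches = []
--
--     for sy in range(0, len(display), mode):
--         for sx in range(0, len(display[0]), mode):
--             all_patches.append(
--                 tuple(display[sy + dy][sx : sx + mode] for dy in range(mode))
--             )
--     return all_patches
-- ===== SOURCE B (Python) =====
-- def disassemble_display(display: list[str]):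
--     n = len(display)
--     if n % 2 == 0:
--         mode = 2
--     elif n % 3 == 0:
--         mode = 3
--     else:
--         raise ValueError(f"Can not disassemble {n}")
--
--     width = len(display[0]) if display else 0
--     patches = {}
--     for y, row in enumerate(display):
--         for x in range(0, width, mode):
--             patches.setdefault((y // mode, x // mode), []).append(row[x : x + mode])
--     return [tuple(p) for p in patches.values()]
-- ===== Notes on version B (the rewrite author's own statement) =====
-- stated objective: alternative
-- what changed: B replaces A's patch-major gather (nested block loops re-indexing display[sy+dy] per patch) by a single row-major streaming pass that scatters each row's width-mode chunks into a dict keyed by block coordinates (y//mode, x//mode), then reads the patches off the dict's values in insertion order.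
import Mathlib
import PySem

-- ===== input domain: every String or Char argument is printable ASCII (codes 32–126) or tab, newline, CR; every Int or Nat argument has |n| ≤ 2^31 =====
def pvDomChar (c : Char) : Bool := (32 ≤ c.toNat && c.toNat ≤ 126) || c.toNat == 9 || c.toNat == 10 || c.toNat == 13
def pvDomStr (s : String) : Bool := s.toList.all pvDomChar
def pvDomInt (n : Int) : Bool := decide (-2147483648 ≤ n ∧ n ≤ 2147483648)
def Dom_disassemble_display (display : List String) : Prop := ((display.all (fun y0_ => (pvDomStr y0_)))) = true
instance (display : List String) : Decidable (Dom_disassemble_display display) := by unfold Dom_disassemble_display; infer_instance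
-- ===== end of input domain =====

-- B: instead of A's patch-major gather (nested block loops re-indexing rows per patch), B makes one
-- row-major streaming pass, scattering each row's width-`mode` chunks into a dict keyed by block
-- coordinates (y//mode, x//mode), and returns the dict's values (objective: alternative).

-- ===== PORT A =====
def disassemble_display (display : List String) : List (List String) :=
  -- mode: 2 if len%2==0, elif len%3==0 then 3, else ValueError (excluded by Pre_)
  let mode : Int := if (display.length : Int) % 2 = 0 then 2 else 3
  (PySem.List.pyRange 0 (display.length : Int) mode).foldl (fun acc sy =>
    (PySem.List.pyRange 0 (PySem.Str.len (PySem.List.pyGetD display 0 "")) mode).foldl (fun acc2 sx =>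
      acc2 ++ [((PySem.List.pyRange 0 mode 1).map (fun dy =>
        PySem.Str.slice (PySem.List.pyGetD display (sy + dy) "") (some sx) (some (sx + mode))))]) acc) []

-- ===== PORT B =====
-- patches.setdefault((y//mode, x//mode), []).append(chunk)  ≡  d.modify key [] (· ++ [chunk])
def disassemble_display_alt (display : List String) : List (List String) :=
  let mode : Int := if (display.length : Int) % 2 = 0 then 2 else 3
  let width : Int := if display.isEmpty then 0 else PySem.Str.len (PySem.List.pyGetD display 0 "")
  let d : PySem.Dict (Int × Int) (List String) :=
    (PySem.List.enumerate display).foldl (fun d p =>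
      (PySem.List.pyRange 0 width mode).foldl (fun d x =>
        d.modify (PySem.Int.floordiv p.1 mode, PySem.Int.floordiv x mode) []
          (fun v => v ++ [PySem.Str.slice p.2 (some x) (some (x + mode))])) d)
      PySem.Dict.empty
  d.values

-- ===== PRECONDITION & SPEC =====
-- Pre_ excludes exactly the inputs where A raises ValueError: row count divisible by neither 2 nor 3.
def Pre_disassemble_display (display : List String) : Prop :=
  (display.length : Int) % 2 = 0 ∨ (display.length : Int) % 3 = 0
instance (display : List String) : Decidable (Pre_disassemble_display display) := by
  unfold Pre_disassemble_display; infer_instance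
def pvWitness_disassemble_display : List String := ["ab", "cd"]
def Spec_disassemble_display (display : List String) (out : List (List String)) : Prop := out = disassemble_display_alt display
instance (display : List String) (out : List (List String)) : Decidable (Spec_disassemble_display display out) := by unfold Spec_disassemble_display; infer_instance

-- ===== CLAIM (what is proved, stated in full; the proofs are below) =====
def Claim_equal_disassemble_display : Prop := ∀ (display : List String), Dom_disassemble_display display → Pre_disassemble_display display → Spec_disassemble_display display (disassemble_display display)

-- ===== LEMMAS AND PROOFS =====

-- nested loop over rows × column starts = one fold over the flattened (key, value) pair list
lemma pv_fold_flat {κ σ α β : Type} [BEq κ] (l : List α) (inner : List β)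
    (key : α → β → κ) (val : α → β → σ) (d : PySem.Dict κ (List σ)) :
    l.foldl (fun d a => inner.foldl (fun d b =>
        d.modify (key a b) [] (fun v => v ++ [val a b])) d) d
    = (l.flatMap (fun a => inner.map (fun b => (key a b, val a b)))).foldl
        (fun d p => d.modify p.1 [] (fun v => v ++ [p.2])) d := by
  induction l generalizing d with
  | nil => simp
  | cons a l ih => simp [List.foldl_append, List.foldl_map, ih]

-- updating a set with elements it already has is a no-op
lemma pv_update_subset {α : Type} [BEq α] [LawfulBEq α] (l : List α) (s : PySem.Set α)
    (h : ∀ x ∈ l, x ∈ s) : s.update l = s := by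
  induction l generalizing s with
  | nil => rfl
  | cons x l ih =>
    have hx : PySem.Set.add s x = s := by
      simp only [PySem.Set.add]
      rw [if_pos]
      simpa using h x (by simp)
    rw [PySem.Set.update_eq_foldl, List.foldl_cons, hx, ← PySem.Set.update_eq_foldl]
    exact ih s (fun y hy => h y (by simp [hy]))

-- updating with fresh distinct elements appends them
lemma pv_update_fresh {α : Type} [BEq α] [LawfulBEq α] (l : List α) (s : PySem.Set α)
    (hn : l.Nodup) (h : ∀ x ∈ l, x ∉ s) : s.update l = s ++ l := by
  induction l generalizing s with
  | nil => simp [PySem.Set.update_eq_foldl]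
  | cons x l ih =>
    have hx : PySem.Set.add s x = s ++ [x] := by
      simp only [PySem.Set.add]
      rw [if_neg]
      simpa using h x (by simp)
    rw [PySem.Set.update_eq_foldl, List.foldl_cons, hx, ← PySem.Set.update_eq_foldl]
    rw [ih (s ++ [x]) hn.of_cons]
    · simp
    · intro y hy
      simp only [List.mem_append, List.mem_singleton]
      rintro (hs | rfl)
      · exact h y (by simp [hy]) hs
      · exact (List.nodup_cons.1 hn).1 hy

-- updating with k ≥ 1 copies of the same list = updating with it once
lemma pv_update_copies {α : Type} [BEq α] [LawfulBEq α] (r : List α) (s : PySem.Set α)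
    (k : Nat) (hk : 0 < k) :
    s.update ((List.range k).flatMap (fun _ => r)) = s.update r := by
  induction k with
  | zero => omega
  | succ k ih =>
    rcases Nat.eq_zero_or_pos k with rfl | hkpos
    · simp
    · rw [List.range_succ, List.flatMap_append, PySem.Set.update_eq_foldl, List.foldl_append,
        ← PySem.Set.update_eq_foldl, ← PySem.Set.update_eq_foldl, ih hkpos]
      simp only [List.flatMap_cons, List.flatMap_nil, List.append_nil]
      exact pv_update_subset r _ (fun x hx => by
        rw [PySem.Set.mem_update]; exact Or.inr hx)

-- enumerate as an indexed map
lemma pv_enumerate {α : Type} (xs : List α) (dflt : α) (s : Int) :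
    PySem.List.enumerate xs s = (List.range xs.length).map (fun i : Nat => ((s + i : Int), xs.getD i dflt)) := by
  induction xs generalizing s with
  | nil => simp [PySem.List.enumerate_nil]
  | cons x xs ih =>
    rw [PySem.List.enumerate_cons, ih (s + 1)]
    simp only [List.length_cons, List.range_succ_eq_map, List.map_cons, List.map_map,
      Function.comp_def, Nat.cast_zero, add_zero, List.getD_cons_zero]
    congr 1
    apply List.map_congr_left
    intro i _
    simp only [List.getD_cons_succ, Prod.mk.injEq]
    refine ⟨by push_cast; ring, trivial⟩

-- range (q*m) split into q bands of m
lemma pv_range_mul (q m : Nat) :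
    List.range (q * m) = (List.range q).flatMap (fun b => (List.range m).map (fun r => b * m + r)) := by
  induction q with
  | zero => simp
  | succ q ih =>
    rw [Nat.succ_mul, List.range_add, ih, List.range_succ, List.flatMap_append]
    simp

-- pyRange 0 (q*m) m enumerates the band starts b*m
lemma pv_pyRange_step (q : Nat) (m : Int) (hm : 0 < m) :
    PySem.List.pyRange 0 ((q : Int) * m) m = (List.range q).map (fun b : Nat => (b : Int) * m) := by
  rw [PySem.List.pyRange_of_pos _ _ hm]
  rcases Nat.eq_zero_or_pos q with rfl | hq
  · simp
  · rw [if_pos (by positivity)]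
    have hcount : ((q : Int) * m - 0 + m - 1) / m = q := by
      rw [show ((q : Int) * m - 0 + m - 1) = (m - 1) + q * m by ring,
        Int.add_mul_ediv_right _ _ (ne_of_gt hm), Int.ediv_eq_zero_of_lt (by omega) (by omega)]
      ring
    rw [hcount]
    simp only [Int.toNat_natCast]
    exact List.map_congr_left (fun k _ => by ring)

-- floordiv facts
lemma pv_fd_band (b r m : Int) (hm : 0 < m) (hr0 : 0 ≤ r) (hr : r < m) :
    PySem.Int.floordiv (b * m + r) m = b := by
  rw [PySem.Int.floordiv_eq_iff_of_pos hm]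
  constructor <;> nlinarith

lemma pv_fd_mul (j m : Int) (hm : 0 < m) : PySem.Int.floordiv (m * j) m = j := by
  rw [PySem.Int.floordiv_eq_iff_of_pos hm]
  constructor <;> nlinarith

-- filtering a nodup list by a predicate true exactly at one of its members
lemma pv_filter_eq {α : Type} (l : List α) (pr : α → Bool) (a : α)
    (hn : l.Nodup) (ha : a ∈ l) (hpr : ∀ x, pr x = true ↔ x = a) : l.filter pr = [a] := by
  induction l with
  | nil => simp at ha
  | cons y l ih =>
    rcases List.mem_cons.1 ha with rfl | ha'
    · have hnil : l.filter pr = [] :=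
        List.filter_eq_nil_iff.2 (fun x hx hpx => (List.nodup_cons.1 hn).1 (((hpr x).1 hpx) ▸ hx))
      rw [List.filter_cons_of_pos ((hpr _).2 rfl), hnil]
    · rw [List.filter_cons_of_neg, ih (List.nodup_cons.1 hn).2 ha']
      exact fun hpy => (List.nodup_cons.1 hn).1 (by rw [(hpr y).1 hpy]; exact ha')

-- flatMap of an indicator collapses to the hit
lemma pv_flatMap_single {α : Type} (l : List Nat) (b0 : Nat) (u : List α)
    (hn : l.Nodup) (hb : b0 ∈ l) :
    l.flatMap (fun b => if b = b0 then u else []) = u := by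
  induction l with
  | nil => simp at hb
  | cons y l ih =>
    simp only [List.flatMap_cons]
    rcases List.mem_cons.1 hb with rfl | hb'
    · rw [if_pos rfl, List.flatMap_eq_nil_iff.2, List.append_nil]
      intro b hbl
      rw [if_neg]
      exact fun h : b = b0 => (List.nodup_cons.1 hn).1 (h ▸ hbl)
    · rw [if_neg (fun h : y = b0 => (List.nodup_cons.1 hn).1 (h ▸ hb')), List.nil_append]
      exact ih (List.nodup_cons.1 hn).2 hb'

-- reading one patch back out of the flattened scatter list
lemma pv_extract {α : Type} (q mN J b0 j0 : Nat) (hb0 : b0 < q) (hj0 : j0 < J)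
    (v : Nat → Nat → Nat → α) :
    ((List.range q).flatMap (fun b : Nat => (List.range mN).flatMap (fun r : Nat =>
       (List.range J).map (fun j : Nat => ((((b : Int), (j : Int)) : Int × Int), v b r j))))).filter
      (fun p => p.1 == (((b0 : Int), (j0 : Int)) : Int × Int))
    = (List.range mN).map (fun r : Nat => ((((b0 : Int), (j0 : Int)) : Int × Int), v b0 r j0)) := by
  rw [List.filter_flatMap]
  have hband : ∀ b ∈ List.range q,
      ((List.range mN).flatMap (fun r : Nat =>
        (List.range J).map (fun j : Nat => ((((b : Int), (j : Int)) : Int × Int), v b r j)))).filter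
          (fun p => p.1 == (((b0 : Int), (j0 : Int)) : Int × Int))
      = if b = b0 then
          (List.range mN).map (fun r : Nat => ((((b0 : Int), (j0 : Int)) : Int × Int), v b0 r j0))
        else [] := by
    intro b _
    rw [List.filter_flatMap]
    by_cases hb : b = b0
    · subst hb
      rw [if_pos rfl]
      have hrow : ∀ r ∈ List.range mN,
          ((List.range J).map (fun j : Nat => ((((b : Int), (j : Int)) : Int × Int), v b r j))).filter
            (fun p => p.1 == (((b : Int), (j0 : Int)) : Int × Int))
          = [((((b : Int), (j0 : Int)) : Int × Int), v b r j0)] := by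
        intro r _
        rw [List.filter_map, pv_filter_eq (List.range J) _ j0 List.nodup_range (List.mem_range.2 hj0) ?_]
        · rfl
        · intro x
          simp
      rw [List.flatMap_congr hrow, ← List.map_eq_flatMap]
    · rw [if_neg hb]
      apply List.flatMap_eq_nil_iff.2
      intro r _
      rw [List.filter_map, List.filter_eq_nil_iff.2, List.map_nil]
      intro j _
      simp only [Function.comp_apply, beq_iff_eq, Prod.mk.injEq, Nat.cast_inj]
      exact fun h => hb h.1
  rw [List.flatMap_congr hband]
  exact pv_flatMap_single _ _ _ List.nodup_range (List.mem_range.2 hb0)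

-- the scatter dict read back: values in key-dedup order, each key collecting its chunks
lemma pv_dict_values (FL : List ((Int × Int) × String)) :
    (FL.foldl (fun d p => d.modify p.1 [] (fun v => v ++ [p.2]))
        (PySem.Dict.empty : PySem.Dict (Int × Int) (List String))).values
    = (PySem.Set.ofList (FL.map (fun p => p.1))).map
        (fun k => (FL.filter (fun p => p.1 == k)).map (fun p => p.2)) := by
  rw [PySem.Dict.values_eq_map_keys _
    (PySem.Dict.nodup_keys_foldl_modify_key FL (fun p => p.1) [] (fun _ p v => v ++ [p.2]) _ (by simp)) []]
  rw [PySem.Dict.keys_foldl_modify_key FL (fun p => p.1) [] (fun _ p v => v ++ [p.2])]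
  simp only [PySem.Dict.keys_empty]
  rw [PySem.Set.update_eq_foldl, ← PySem.Set.ofList_eq_foldl]
  apply List.map_congr_left
  intro k _
  rw [PySem.Dict.getD_foldl_modify_append, PySem.Dict.getD_empty, List.nil_append]

-- the dedup of the scattered keys, band by band
lemma pv_ofList_K (J mN q : Nat) (hm : 0 < mN) :
    PySem.Set.ofList ((List.range q).flatMap (fun b : Nat => (List.range mN).flatMap (fun _ : Nat =>
      (List.range J).map (fun j : Nat => (((b : Int), (j : Int)) : Int × Int))))) =
    (List.range q).flatMap (fun b : Nat => (List.range J).map (fun j : Nat => (((b : Int), (j : Int)) : Int × Int))) := by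
  induction q with
  | zero => rfl
  | succ q ih =>
    rw [List.range_succ, List.flatMap_append, List.flatMap_append, PySem.Set.ofList_eq_foldl,
      List.foldl_append, ← PySem.Set.ofList_eq_foldl, ← PySem.Set.update_eq_foldl]
    simp only [List.flatMap_cons, List.flatMap_nil, List.append_nil]
    rw [pv_update_copies _ _ mN hm, pv_update_fresh _ _ ?nd ?fr, ih]
    case nd =>
      refine List.Nodup.map ?_ List.nodup_range
      intro a b h
      have := congrArg Prod.snd h
      simp only at this
      exact_mod_cast this
    case fr =>
      intro x hx hmem
      rw [PySem.Set.mem_ofList] at hmem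
      obtain ⟨b, hb, hxin⟩ := List.mem_flatMap.1 hmem
      obtain ⟨_, _, hxin2⟩ := List.mem_flatMap.1 hxin
      obtain ⟨j, _, rfl⟩ := List.mem_map.1 hxin2
      obtain ⟨j', _, h'⟩ := List.mem_map.1 hx
      have hbq : (q : Int) = (b : Int) := congrArg Prod.fst h'
      have : b = q := by exact_mod_cast hbq.symm
      exact absurd (List.mem_range.1 hb) (by omega)

-- the main computation: band/chunk structure of both folds, generic in mode and width
lemma pv_main (display : List String) (mN : Nat) (W : Int) (hm : 0 < mN)
    (hdvd : mN ∣ display.length) :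
    (PySem.List.pyRange 0 (display.length : Int) (mN : Int)).foldl (fun acc sy =>
      (PySem.List.pyRange 0 W (mN : Int)).foldl (fun acc2 sx =>
        acc2 ++ [((PySem.List.pyRange 0 (mN : Int) 1).map (fun dy =>
          PySem.Str.slice (PySem.List.pyGetD display (sy + dy) "") (some sx) (some (sx + (mN : Int)))))]) acc) []
    =
    ((PySem.List.enumerate display).foldl (fun d p =>
      (PySem.List.pyRange 0 W (mN : Int)).foldl (fun d x =>
        d.modify (PySem.Int.floordiv p.1 (mN : Int), PySem.Int.floordiv x (mN : Int)) []
          (fun v => v ++ [PySem.Str.slice p.2 (some x) (some (x + (mN : Int)))])) d)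
      (PySem.Dict.empty : PySem.Dict (Int × Int) (List String))).values := by
  obtain ⟨q, hq⟩ := hdvd
  have hm' : (0 : Int) < (mN : Int) := by exact_mod_cast hm
  -- concrete column starts
  rw [PySem.List.pyRange_of_pos 0 W hm']
  generalize (if 0 < W then ((W - 0 + (mN : Int) - 1) / (mN : Int)).toNat else 0) = J
  simp only [zero_add]
  -- ===== A side =====
  simp only [PySem.List.foldl_append_singleton_eq_map]
  rw [PySem.List.foldl_append_eq_flatMap, List.nil_append]
  have hlen : (display.length : Int) = (q : Int) * (mN : Int) := by rw [hq]; push_cast; ring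
  rw [hlen, pv_pyRange_step q (mN : Int) hm', List.flatMap_map]
  have hA : (List.range q).flatMap (fun b : Nat =>
      (List.map (fun sx => (PySem.List.pyRange 0 (mN : Int) 1).map (fun dy =>
          PySem.Str.slice (PySem.List.pyGetD display ((b : Int) * (mN : Int) + dy) "") (some sx) (some (sx + (mN : Int)))))
        ((List.range J).map (fun k : Nat => (mN : Int) * (k : Int)))))
      = (List.range q).flatMap (fun b : Nat => (List.range J).map (fun j : Nat => (List.range mN).map (fun r : Nat =>
          PySem.Str.slice (display.getD (b * mN + r) "") (some ((mN : Int) * (j : Int)))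
            (some ((mN : Int) * (j : Int) + (mN : Int)))))) := by
    apply List.flatMap_congr
    intro b _
    rw [List.map_map]
    apply List.map_congr_left
    intro j _
    simp only [Function.comp_def]
    rw [PySem.List.pyRange_zero_nat mN, List.map_map]
    apply List.map_congr_left
    intro r _
    simp only [Function.comp_def]
    have hcast : (b : Int) * (mN : Int) + (r : Int) = ((b * mN + r : Nat) : Int) := by push_cast; ring
    rw [hcast, PySem.List.pyGetD_natCast]
  rw [hA]
  -- ===== B side =====
  rw [pv_enumerate display "" 0]
  simp only [zero_add, List.foldl_map]
  rw [pv_fold_flat (List.range display.length) (List.range J)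
    (fun (i : Nat) (j : Nat) => (PySem.Int.floordiv (i : Int) (mN : Int), PySem.Int.floordiv ((mN : Int) * (j : Int)) (mN : Int)))
    (fun (i : Nat) (j : Nat) => PySem.Str.slice (display.getD i "") (some ((mN : Int) * (j : Int))) (some ((mN : Int) * (j : Int) + (mN : Int))))]
  -- flatten the rows into bands
  have hFL :
      (List.range display.length).flatMap (fun a : Nat => (List.range J).map (fun j : Nat =>
        ((PySem.Int.floordiv (a : Int) (mN : Int), PySem.Int.floordiv ((mN : Int) * (j : Int)) (mN : Int)),
          PySem.Str.slice (display.getD a "") (some ((mN : Int) * (j : Int))) (some ((mN : Int) * (j : Int) + (mN : Int))))))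
      = (List.range q).flatMap (fun b : Nat => (List.range mN).flatMap (fun r : Nat =>
          (List.range J).map (fun j : Nat => ((((b : Int), (j : Int)) : Int × Int),
            PySem.Str.slice (display.getD (b * mN + r) "") (some ((mN : Int) * (j : Int)))
              (some ((mN : Int) * (j : Int) + (mN : Int))))))) := by
    rw [hq, Nat.mul_comm, pv_range_mul q mN, List.flatMap_assoc]
    apply List.flatMap_congr
    intro b _
    rw [List.flatMap_map]
    apply List.flatMap_congr
    intro r hr
    apply List.map_congr_left
    intro j _
    have h1 : PySem.Int.floordiv ((b * mN + r : Nat) : Int) (mN : Int) = (b : Int) := by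
      rw [show ((b * mN + r : Nat) : Int) = (b : Int) * (mN : Int) + (r : Int) by push_cast; ring]
      exact pv_fd_band _ _ _ hm' (by positivity) (by exact_mod_cast List.mem_range.1 hr)
    rw [h1, pv_fd_mul _ _ hm']
  rw [hFL, pv_dict_values]
  simp only [List.map_flatMap, List.map_map, Function.comp_def]
  rw [pv_ofList_K J mN q hm, List.map_flatMap]
  apply List.flatMap_congr
  intro b0 hb0
  rw [List.map_map]
  apply List.map_congr_left
  intro j0 hj0
  simp only [Function.comp_def]
  rw [pv_extract q mN J b0 j0 (List.mem_range.1 hb0) (List.mem_range.1 hj0)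
    (fun b r j => PySem.Str.slice (display.getD (b * mN + r) "") (some ((mN : Int) * (j : Int)))
      (some ((mN : Int) * (j : Int) + (mN : Int))))]
  rw [List.map_map]
  simp only [Function.comp_def]

-- ===== VERDICT (by name: the statement is the Claim_ definition above) =====
theorem disassemble_display_spec : Claim_equal_disassemble_display := by
  intro display _ hpre
  unfold Spec_disassemble_display disassemble_display disassemble_display_alt
  rcases eq_or_ne display [] with rfl | hne
  · rfl
  · have hW : (if display.isEmpty then (0 : Int) else PySem.Str.len (PySem.List.pyGetD display 0 ""))
        = PySem.Str.len (PySem.List.pyGetD display 0 "") := by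
      rw [if_neg (by simpa using hne)]
    by_cases h2 : (display.length : Int) % 2 = 0
    · simp only [if_pos h2, hW]
      have := pv_main display 2 (PySem.Str.len (PySem.List.pyGetD display 0 "")) (by norm_num) (by omega)
      simpa using this
    · have h3 : (display.length : Int) % 3 = 0 := hpre.resolve_left h2
      simp only [if_neg h2, hW]
      have := pv_main display 3 (PySem.Str.len (PySem.List.pyGetD display 0 "")) (by norm_num) (by omega)
      simpa using this
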